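-- pv_equiv track=rewrite | github.com/Ag3497120/verantyx-v6 | arc/world_commands.py | duplicate_objs_h
-- ===== SOURCE A (Python) =====
-- from collections import Counter, defaultdict
--
-- def _bg(g):
--     c = Counter()
--     for row in g: c.update(row)
--     return c.most_common(1)[0][0]
--
-- def _copy(g):
--     return [row[:] for row in g]
--
-- def _objects(g, bg, conn=4):
--     h, w = len(g), len(g[0])
--     vis = [[False]*w for _ in range(h)]
--     objs = []
--     ds = [(-1,0),(1,0),(0,-1),(0,1)]
--     if conn == 8: ds += [(-1,-1),(-1,1),(1,-1),(1,1)]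
--     for r in range(h):
--         for c in range(w):
--             if not vis[r][c] and g[r][c] != bg:
--                 obj = []; stk = [(r,c)]; vis[r][c] = True
--                 while stk:
--                     cr, cc = stk.pop()
--                     obj.append((cr,cc,g[cr][cc]))
--                     for dr,dc in ds:
--                         nr,nc = cr+dr, cc+dc
--                         if 0<=nr<h and 0<=nc<w and not vis[nr][nc] and g[nr][nc] != bg:
--                             vis[nr][nc] = True; stk.append((nr,nc))
--                 objs.append(obj)
--     return objs
--
-- def _bbox(cells):
--     rs = [r for r,c,_ in cells]; cs = [c for r,c,_ in cells]
--     return min(rs), min(cs), max(rs), max(cs)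
--
-- def duplicate_objs_h(g):
--     """各オブジェクトを右に複製"""
--     bg=_bg(g); objs=_objects(g,bg); h,w=len(g),len(g[0]); res=_copy(g)
--     for obj in objs:
--         r0,c0,r1,c1=_bbox(obj)
--         ow=c1-c0+1
--         for r,c,v in obj:
--             nc=c+ow+1
--             if 0<=nc<w: res[r][nc]=v
--     return res
-- ===== SOURCE B (Python) =====
-- from collections import Counter
--
-- def duplicate_objs_h(g):
--     """Duplicate each non-background object one bbox-width (+1 gap) to the right.
--
--     Re-implementation: instead of a DFS with a shared visited matrix and an
--     explicit stack, each object is obtained as the 4-neighbour closure of its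
--     seed by fixpoint iteration over position sets (expanding a frontier set
--     until nothing is added), and its copy is written in row-major order."""
--     h, w = len(g), len(g[0])
--     bg = Counter(v for row in g for v in row).most_common(1)[0][0]
--     def closure(sr, sc):
--         comp = {(sr, sc)}
--         frontier = {(sr, sc)}
--         while frontier:
--             frontier = {(r + dr, c + dc)
--                         for (r, c) in frontier
--                         for dr, dc in ((-1, 0), (1, 0), (0, -1), (0, 1))
--                         if 0 <= r + dr < h and 0 <= c + dc < w
--                         and g[r + dr][c + dc] != bg} - comp
--             comp |= frontier
--         return comp
--     res = [row[:] for row in g]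
--     done = set()
--     for sr in range(h):
--         for sc in range(w):
--             if (sr, sc) not in done and g[sr][sc] != bg:
--                 comp = closure(sr, sc)
--                 done |= comp
--                 ow = max(c for _, c in comp) - min(c for _, c in comp) + 1
--                 for r in range(h):
--                     for c in range(w):
--                         if (r, c) in comp and c + ow + 1 < w:
--                             res[r][c + ow + 1] = g[r][c]
--     return res
-- ===== Notes on version B (the rewrite author's own statement) =====
-- stated objective: alternative
-- what changed: Objects are computed as fixpoint closures of each seed by frontier expansion over position sets (no shared visited matrix, no DFS stack) and each object's copy is written in row-major order onto the result, instead of A's stack-based flood fill with a visited matrix and per-object discovery-order writes.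
import Mathlib
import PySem

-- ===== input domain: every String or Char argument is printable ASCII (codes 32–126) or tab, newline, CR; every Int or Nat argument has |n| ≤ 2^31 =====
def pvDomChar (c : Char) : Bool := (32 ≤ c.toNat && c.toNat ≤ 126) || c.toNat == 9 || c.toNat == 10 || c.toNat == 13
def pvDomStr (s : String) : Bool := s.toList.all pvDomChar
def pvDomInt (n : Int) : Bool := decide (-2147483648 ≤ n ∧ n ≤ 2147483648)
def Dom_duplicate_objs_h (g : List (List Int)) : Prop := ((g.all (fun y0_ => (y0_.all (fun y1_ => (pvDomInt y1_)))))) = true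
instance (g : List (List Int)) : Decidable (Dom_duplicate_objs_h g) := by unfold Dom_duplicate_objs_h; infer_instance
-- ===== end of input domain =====

-- B re-implements A's DFS flood fill: objects are obtained as bounded fixpoint
-- closures of each seed over position sets and copies are written row-major;
-- objective: alternative (no speed claim).

-- ===== shared library-level helpers (used by both ports for the same Python built-ins) =====
-- g[r][c] under in-range guards (rows of length ≥ w under Pre_, so getD is exact there)
def pvAt (g : List (List Int)) (r c : Nat) : Int := (g.getD r []).getD c 0
-- res[r][c] = v (indices in range whenever used under Pre_)
def pvSetG (res : List (List Int)) (r c : Nat) (v : Int) : List (List Int) :=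
  res.set r ((res.getD r []).set c v)
-- Counter.most_common(1)[0][0]: first key of maximal count, in insertion order
def pvMC1 : List (Int × Int) → Int
  | [] => 0
  | (k, v) :: rest => (rest.foldl (fun b p => if b.2 < p.2 then p else b) (k, v)).1
-- the cells (r, c), r in range(h), c in range(w), row-major
def pvCellsList (h w : Nat) : List (Nat × Nat) := (List.range h) ×ˢ (List.range w)
def pvDirs : List (Int × Int) := [(-1, 0), (1, 0), (0, -1), (0, 1)]

-- ===== PORT A =====
-- _bg: a Counter updated row by row, then most_common(1)[0][0]
def pvBgA (g : List (List Int)) : Int :=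
  pvMC1 (g.foldl (fun d row => row.foldl (fun d x => d.modify x 0 (· + 1)) d)
          (PySem.Dict.empty : PySem.Dict Int Int)).items

-- the inner `for dr,dc in ds:` push loop of _objects (stack head = top; vis as a set of cells)
def pvPush (g : List (List Int)) (bg : Int) (h w : Nat) (p : Nat × Nat) :
    List (Int × Int) → List (Nat × Nat) → Finset (Nat × Nat) → List (Nat × Nat) × Finset (Nat × Nat)
  | [], stk, vis => (stk, vis)
  | d :: ds, stk, vis =>
    let nr : Int := (p.1 : Int) + d.1
    let nc : Int := (p.2 : Int) + d.2
    if 0 ≤ nr ∧ nr < (h : Int) ∧ 0 ≤ nc ∧ nc < (w : Int) ∧ (nr.toNat, nc.toNat) ∉ vis ∧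
        pvAt g nr.toNat nc.toNat ≠ bg then
      pvPush g bg h w p ds ((nr.toNat, nc.toNat) :: stk) (insert (nr.toNat, nc.toNat) vis)
    else pvPush g bg h w p ds stk vis

-- the `while stk:` DFS loop (fuel makes it total; the chosen fuel is provably never exhausted)
def pvDfs (g : List (List Int)) (bg : Int) (h w : Nat) :
    Nat → List (Nat × Nat) → Finset (Nat × Nat) → List (Nat × Nat × Int) →
    List (Nat × Nat × Int) × Finset (Nat × Nat)
  | 0, _, vis, obj => (obj, vis)
  | _ + 1, [], vis, obj => (obj, vis)
  | fuel + 1, p :: stk, vis, obj =>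
    let st := pvPush g bg h w p pvDirs stk vis
    pvDfs g bg h w fuel st.1 st.2 (obj ++ [(p.1, p.2, pvAt g p.1 p.2)])

-- _objects: row-major scan, DFS from each未訪問 non-bg cell
def pvScanA (g : List (List Int)) (bg : Int) (h w : Nat) : List (List (Nat × Nat × Int)) :=
  ((pvCellsList h w).foldl
    (fun (st : Finset (Nat × Nat) × List (List (Nat × Nat × Int))) p =>
      if p ∉ st.1 ∧ pvAt g p.1 p.2 ≠ bg then
        let r := pvDfs g bg h w (3 * (h * w) + 3) [p] (insert p st.1) []
        (r.2, st.2 ++ [r.1])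
      else st) (∅, [])).2

-- the per-object body of duplicate_objs_h: _bbox then the write loop
-- (Python also computes r0, r1 = min/max of rows; they are unused by duplicate_objs_h)
def pvBatchA (w : Nat) (res : List (List Int))
    (obj : List (Nat × Nat × Int)) : List (List Int) :=
  let cs := obj.map (fun t => t.2.1)
  let c0 := (PySem.List.min? cs (fun x => x)).getD 0
  let c1 := (PySem.List.max? cs (fun x => x)).getD 0
  let ow := c1 - c0 + 1
  obj.foldl (fun res t =>
    let nc := t.2.1 + ow + 1
    -- Python checks 0 <= nc < w; 0 ≤ nc is automatic for these Nat values
    if nc < w then pvSetG res t.1 nc t.2.2 else res) res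

def duplicate_objs_h (g : List (List Int)) : List (List Int) :=
  let bg := pvBgA g
  let h := g.length
  let w := (g.headD []).length
  let objs := pvScanA g bg h w
  objs.foldl (pvBatchA w) g     -- res := _copy(g), then the object write loops

-- ===== PORT B =====
-- Counter(v for row in g for v in row).most_common(1)[0][0]
def pvBgB (g : List (List Int)) : Int :=
  pvMC1 (PySem.Dict.counter (g.flatMap (fun row => row))).items

-- the in-range non-bg 4-neighbours of a cell (the comprehension's generator)
def pvNbr (g : List (List Int)) (bg : Int) (h w : Nat) (p : Nat × Nat) : List (Nat × Nat) :=
  pvDirs.filterMap (fun d =>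
    if 0 ≤ (p.1 : Int) + d.1 ∧ (p.1 : Int) + d.1 < (h : Int) ∧ 0 ≤ (p.2 : Int) + d.2 ∧
        (p.2 : Int) + d.2 < (w : Int) ∧ pvAt g ((p.1 : Int) + d.1).toNat ((p.2 : Int) + d.2).toNat ≠ bg
    then some (((p.1 : Int) + d.1).toNat, ((p.2 : Int) + d.2).toNat) else none)

-- the `while frontier:` loop of closure (fuel makes it total; h*w rounds always suffice)
def pvGrow (g : List (List Int)) (bg : Int) (h w : Nat) :
    Nat → Finset (Nat × Nat) × Finset (Nat × Nat) → Finset (Nat × Nat)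
  | 0, st => st.1
  | fuel + 1, st =>
    if st.2 = ∅ then st.1
    else
      let fr := (st.2.biUnion (fun q => (pvNbr g bg h w q).toFinset)) \ st.1
      pvGrow g bg h w fuel (st.1 ∪ fr, fr)

-- closure(sr, sc): frontier expansion from the seed until nothing is added
def pvClosure (g : List (List Int)) (bg : Int) (h w : Nat) (p : Nat × Nat) : Finset (Nat × Nat) :=
  pvGrow g bg h w (h * w) ({p}, {p})

-- ow from the component, then the row-major write double loop
def pvBatchB (g : List (List Int)) (h w : Nat) (comp : Finset (Nat × Nat))
    (res : List (List Int)) : List (List Int) :=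
  let cs := comp.image Prod.snd
  let ow := cs.max.unbotD 0 - cs.min.untopD 0 + 1
  (pvCellsList h w).foldl (fun res q =>
    if q ∈ comp ∧ q.2 + ow + 1 < w then pvSetG res q.1 (q.2 + ow + 1) (pvAt g q.1 q.2) else res) res

def duplicate_objs_h_alt (g : List (List Int)) : List (List Int) :=
  let h := g.length
  let w := (g.headD []).length
  let bg := pvBgB g
  ((pvCellsList h w).foldl
    (fun (st : Finset (Nat × Nat) × List (List Int)) p =>
      if p ∉ st.1 ∧ pvAt g p.1 p.2 ≠ bg then
        let comp := pvClosure g bg h w p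
        (st.1 ∪ comp, pvBatchB g h w comp st.2)
      else st) (∅, g)).2

-- ===== PRECONDITION & SPEC =====
-- Pre_ excludes exactly the grids on which Python A raises IndexError: the empty grid,
-- grids whose rows are all empty (empty background Counter), and grids with a row
-- shorter than row 0 (read out of range during the scan).
def Pre_duplicate_objs_h (g : List (List Int)) : Prop :=
  g ≠ [] ∧ (∃ row ∈ g, row ≠ []) ∧ ∀ row ∈ g, (g.headD []).length ≤ row.length
instance (g : List (List Int)) : Decidable (Pre_duplicate_objs_h g) := by
  unfold Pre_duplicate_objs_h; infer_instance

def pvWitness_duplicate_objs_h : List (List Int) := [[0, 1, 0, 0], [0, 1, 0, 0], [0, 0, 0, 2]]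

def Spec_duplicate_objs_h (g : List (List Int)) (out : List (List Int)) : Prop :=
  out = duplicate_objs_h_alt g
instance (g : List (List Int)) (out : List (List Int)) : Decidable (Spec_duplicate_objs_h g out) := by
  unfold Spec_duplicate_objs_h; infer_instance

-- ===== CLAIM (what is proved, stated in full; the proofs are below) =====
def Claim_equal_duplicate_objs_h : Prop := ∀ (g : List (List Int)), Dom_duplicate_objs_h g → Pre_duplicate_objs_h g → Spec_duplicate_objs_h g (duplicate_objs_h g)

-- ===== LEMMAS AND PROOFS =====

-- valid cell: in range and non-background
def pvValid (g : List (List Int)) (bg : Int) (h w : Nat) (p : Nat × Nat) : Prop :=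
  p.1 < h ∧ p.2 < w ∧ pvAt g p.1 p.2 ≠ bg

-- 4-adjacency
def pvAdj (p q : Nat × Nat) : Prop :=
  (p.1 = q.1 ∧ (p.2 = q.2 + 1 ∨ q.2 = p.2 + 1)) ∨ (p.2 = q.2 ∧ (p.1 = q.1 + 1 ∨ q.1 = p.1 + 1))

-- connectivity through valid cells
inductive pvConn (g : List (List Int)) (bg : Int) (h w : Nat) : Nat × Nat → Nat × Nat → Prop
  | refl (p : Nat × Nat) : pvValid g bg h w p → pvConn g bg h w p p
  | tail {p q r : Nat × Nat} : pvConn g bg h w p q → pvAdj q r → pvValid g bg h w r →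
      pvConn g bg h w p r

def pvCellsOf (obj : List (Nat × Nat × Int)) : List (Nat × Nat) := obj.map (fun t => (t.1, t.2.1))

theorem pvAdj_symm {p q : Nat × Nat} (h : pvAdj p q) : pvAdj q p := by
  unfold pvAdj at *; omega

theorem pvConn_valid_right {g bg h w p q} (hc : pvConn g bg h w p q) : pvValid g bg h w q := by
  induction hc with
  | refl hv => exact hv
  | tail _ _ hv _ => exact hv

theorem pvConn_trans {g bg h w p q r} (h1 : pvConn g bg h w p q) (h2 : pvConn g bg h w q r) :
    pvConn g bg h w p r := by
  induction h2 with
  | refl _ => exact h1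
  | tail _ ha hv ih => exact pvConn.tail ih ha hv

theorem pvConn_head {g bg h w p q r} (hv : pvValid g bg h w p) (ha : pvAdj p q)
    (hc : pvConn g bg h w q r) : pvConn g bg h w p r := by
  induction hc with
  | refl hq => exact pvConn.tail (pvConn.refl p hv) ha hq
  | tail _ ha' hv' ih => exact pvConn.tail ih ha' hv'

theorem pvConn_symm {g bg h w p q} (hc : pvConn g bg h w p q) : pvConn g bg h w q p := by
  induction hc with
  | refl hv => exact pvConn.refl _ hv
  | tail _ ha hv ih => exact pvConn_head hv (pvAdj_symm ha) ih

theorem mem_pvNbr {g bg h w} {p q : Nat × Nat} :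
    q ∈ pvNbr g bg h w p ↔ pvValid g bg h w q ∧ pvAdj p q := by
  constructor
  · intro hq
    simp only [pvNbr, List.mem_filterMap, pvDirs] at hq
    obtain ⟨d, hd, hf⟩ := hq
    split at hf
    · rename_i hg
      obtain ⟨h1, h2, h3, h4, h5⟩ := hg
      cases hf
      refine ⟨⟨by omega, by omega, h5⟩, ?_⟩
      simp only [List.mem_cons, List.not_mem_nil, or_false] at hd
      unfold pvAdj
      rcases hd with rfl | rfl | rfl | rfl <;> simp_all <;> omega
    · cases hf
  · rintro ⟨⟨hq1, hq2, hq3⟩, hadj⟩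
    simp only [pvNbr, List.mem_filterMap, pvDirs]
    unfold pvAdj at hadj
    rcases hadj with ⟨he, hc | hc⟩ | ⟨he, hc | hc⟩
    · refine ⟨(0, -1), by simp, ?_⟩
      have h1 : ((p.1 : Int) + (0 : Int)).toNat = q.1 := by omega
      have h2 : ((p.2 : Int) + (-1 : Int)).toNat = q.2 := by omega
      simp only [h1, h2]
      rw [if_pos ⟨by omega, by omega, by omega, by omega, hq3⟩]
    · refine ⟨(0, 1), by simp, ?_⟩
      have h1 : ((p.1 : Int) + (0 : Int)).toNat = q.1 := by omega
      have h2 : ((p.2 : Int) + (1 : Int)).toNat = q.2 := by omega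
      simp only [h1, h2]
      rw [if_pos ⟨by omega, by omega, by omega, by omega, hq3⟩]
    · refine ⟨(-1, 0), by simp, ?_⟩
      have h1 : ((p.1 : Int) + (-1 : Int)).toNat = q.1 := by omega
      have h2 : ((p.2 : Int) + (0 : Int)).toNat = q.2 := by omega
      simp only [h1, h2]
      rw [if_pos ⟨by omega, by omega, by omega, by omega, hq3⟩]
    · refine ⟨(1, 0), by simp, ?_⟩
      have h1 : ((p.1 : Int) + (1 : Int)).toNat = q.1 := by omega
      have h2 : ((p.2 : Int) + (0 : Int)).toNat = q.2 := by omega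
      simp only [h1, h2]
      rw [if_pos ⟨by omega, by omega, by omega, by omega, hq3⟩]

-- the generator of pvNbr restricted to a dirs suffix (proof-side helper)
def pvNbrAux (g : List (List Int)) (bg : Int) (h w : Nat) (p : Nat × Nat)
    (ds : List (Int × Int)) : List (Nat × Nat) :=
  ds.filterMap (fun d =>
    if 0 ≤ (p.1 : Int) + d.1 ∧ (p.1 : Int) + d.1 < (h : Int) ∧ 0 ≤ (p.2 : Int) + d.2 ∧
        (p.2 : Int) + d.2 < (w : Int) ∧ pvAt g ((p.1 : Int) + d.1).toNat ((p.2 : Int) + d.2).toNat ≠ bg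
    then some (((p.1 : Int) + d.1).toNat, ((p.2 : Int) + d.2).toNat) else none)

theorem pvNbr_eq_aux (g : List (List Int)) (bg : Int) (h w : Nat) (p : Nat × Nat) :
    pvNbr g bg h w p = pvNbrAux g bg h w p pvDirs := rfl

-- pvPush appends exactly the not-yet-visited valid neighbours generated by ds
theorem pvPush_spec (g : List (List Int)) (bg : Int) (h w : Nat) (p : Nat × Nat) :
    ∀ (ds : List (Int × Int)) (stk : List (Nat × Nat)) (vis : Finset (Nat × Nat)),
    ∃ new : List (Nat × Nat),
      pvPush g bg h w p ds stk vis = (new ++ stk, vis ∪ new.toFinset) ∧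
      new.Nodup ∧ (∀ q ∈ new, q ∉ vis) ∧
      (∀ q ∈ new, q ∈ pvNbrAux g bg h w p ds) ∧
      (∀ q ∈ pvNbrAux g bg h w p ds, q ∉ vis → q ∈ new) := by
  intro ds
  induction ds with
  | nil =>
    intro stk vis
    exact ⟨[], by simp [pvPush], by simp, by simp, by simp, by simp [pvNbrAux]⟩
  | cons d ds ih =>
    intro stk vis
    by_cases hg : 0 ≤ (p.1 : Int) + d.1 ∧ (p.1 : Int) + d.1 < (h : Int) ∧
        0 ≤ (p.2 : Int) + d.2 ∧ (p.2 : Int) + d.2 < (w : Int) ∧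
        pvAt g ((p.1 : Int) + d.1).toNat ((p.2 : Int) + d.2).toNat ≠ bg
    · set t : Nat × Nat := (((p.1 : Int) + d.1).toNat, ((p.2 : Int) + d.2).toNat) with ht
      have haux : pvNbrAux g bg h w p (d :: ds) = t :: pvNbrAux g bg h w p ds := by
        simp only [pvNbrAux, List.filterMap_cons]
        rw [if_pos hg]
      by_cases hv : t ∈ vis
      · -- already visited: not pushed
        obtain ⟨new, heq, hnd, hnv, hsub, hcom⟩ := ih stk vis
        refine ⟨new, ?_, hnd, hnv, ?_, ?_⟩
        · rw [← heq]
          simp only [pvPush]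
          rw [if_neg (by simp only [ht] at hv ⊢; tauto)]
        · intro q hq; rw [haux]; exact List.mem_cons_of_mem _ (hsub q hq)
        · intro q hq hqv
          rw [haux] at hq
          rcases List.mem_cons.mp hq with rfl | hq
          · exact absurd hv hqv
          · exact hcom q hq hqv
      · -- pushed, then the rest with t visited
        obtain ⟨new, heq, hnd, hnv, hsub, hcom⟩ := ih (t :: stk) (insert t vis)
        refine ⟨new ++ [t], ?_, ?_, ?_, ?_, ?_⟩
        · simp only [pvPush]
          rw [if_pos (by refine ⟨hg.1, hg.2.1, hg.2.2.1, hg.2.2.2.1, ?_, hg.2.2.2.2⟩; exact hv)]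
          rw [heq, Prod.mk.injEq]
          refine ⟨by simp, ?_⟩
          ext x
          simp only [Finset.mem_union, Finset.mem_insert, List.toFinset_append,
            List.toFinset_cons, List.toFinset_nil, insert_empty_eq, List.mem_toFinset,
            Finset.mem_singleton]
          tauto
        · rw [List.nodup_append]
          refine ⟨hnd, by simp, ?_⟩
          intro x hx y hy
          simp only [List.mem_singleton] at hy
          subst hy
          intro hxy
          subst hxy
          exact hnv _ hx (Finset.mem_insert_self _ vis)
        · intro q hq
          rcases List.mem_append.mp hq with hq | hq
          · intro hqv; exact hnv q hq (Finset.mem_insert_of_mem hqv)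
          · simp only [List.mem_singleton] at hq; subst hq; exact hv
        · intro q hq
          rw [haux]
          rcases List.mem_append.mp hq with hq | hq
          · exact List.mem_cons_of_mem _ (hsub q hq)
          · simp only [List.mem_singleton] at hq; subst hq; exact List.mem_cons_self
        · intro q hq hqv
          rw [haux] at hq
          rcases List.mem_cons.mp hq with rfl | hq
          · exact List.mem_append.mpr (Or.inr (List.mem_singleton.mpr rfl))
          · by_cases hqt : q = t
            · subst hqt; exact List.mem_append.mpr (Or.inr (by simp))
            · exact List.mem_append.mpr (Or.inl (hcom q hq (by
                intro hmem
                rcases Finset.mem_insert.mp hmem with h' | h'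
                · exact hqt h'
                · exact hqv h')))
    · -- guard of the direction fails: nothing generated, nothing pushed
      obtain ⟨new, heq, hnd, hnv, hsub, hcom⟩ := ih stk vis
      have haux : pvNbrAux g bg h w p (d :: ds) = pvNbrAux g bg h w p ds := by
        simp only [pvNbrAux, List.filterMap_cons]
        rw [if_neg hg]
      refine ⟨new, ?_, hnd, hnv, by rw [haux]; exact hsub, by rw [haux]; exact hcom⟩
      rw [← heq]
      simp only [pvPush]
      rw [if_neg (by tauto)]

-- one full expansion round over a set (A specification device in the proofs:
-- pvGrow's frontier rounds are proven to compute its iterates)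
def pvExpand (g : List (List Int)) (bg : Int) (h w : Nat) (comp : Finset (Nat × Nat)) :
    Finset (Nat × Nat) :=
  comp ∪ comp.biUnion (fun p => (pvNbr g bg h w p).toFinset)

theorem mem_pvExpand {g bg hh w} {X : Finset (Nat × Nat)} {q : Nat × Nat} :
    q ∈ pvExpand g bg hh w X ↔ q ∈ X ∨ ∃ x ∈ X, q ∈ pvNbr g bg hh w x := by
  simp [pvExpand]

theorem pvIter_subset_succ (g : List (List Int)) (bg : Int) (hh w : Nat) (p : Nat × Nat) (n : Nat) :
    (pvExpand g bg hh w)^[n] {p} ⊆ (pvExpand g bg hh w)^[n + 1] {p} := by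
  rw [Function.iterate_succ_apply']
  exact Finset.subset_union_left

theorem pvIter_subset (g : List (List Int)) (bg : Int) (hh w : Nat) (p : Nat × Nat) :
    ∀ {m n : Nat}, m ≤ n → (pvExpand g bg hh w)^[m] {p} ⊆ (pvExpand g bg hh w)^[n] {p} := by
  intro m n hmn
  induction n with
  | zero => simp [Nat.le_zero.mp hmn]
  | succ n ih =>
    rcases Nat.lt_or_ge m (n + 1) with hlt | hge
    · exact (ih (Nat.lt_succ_iff.mp hlt)).trans (pvIter_subset_succ g bg hh w p n)
    · have : m = n + 1 := le_antisymm hmn hge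
      subst this
      exact Finset.Subset.refl _

theorem pvClosure_sound {g bg hh w} {p : Nat × Nat} (hp : pvValid g bg hh w p) :
    ∀ (n : Nat) (q : Nat × Nat), q ∈ (pvExpand g bg hh w)^[n] {p} → pvConn g bg hh w p q := by
  intro n
  induction n with
  | zero =>
    intro q hq
    simp only [Function.iterate_zero_apply, Finset.mem_singleton] at hq
    subst hq
    exact pvConn.refl _ hp
  | succ n ih =>
    intro q hq
    rw [Function.iterate_succ_apply'] at hq
    rcases mem_pvExpand.mp hq with hq | ⟨x, hx, hqn⟩
    · exact ih q hq
    · obtain ⟨hv, ha⟩ := mem_pvNbr.mp hqn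
      exact pvConn.tail (ih x hx) ha hv

theorem pvIter_fixed_forever (g : List (List Int)) (bg : Int) (hh w : Nat)
    (X : Finset (Nat × Nat)) (hX : pvExpand g bg hh w X = X) :
    ∀ k, (pvExpand g bg hh w)^[k] X = X := by
  intro k
  induction k with
  | zero => rfl
  | succ k ih => rw [Function.iterate_succ_apply', ih, hX]

-- the frontier loop computes the expansion iterate (interior cells are already closed)
theorem pvGrow_eq (g : List (List Int)) (bg : Int) (hh w : Nat) :
    ∀ (fuel : Nat) (comp fr : Finset (Nat × Nat)),
    fr ⊆ comp →
    (∀ q ∈ comp, q ∉ fr → ∀ r ∈ pvNbr g bg hh w q, r ∈ comp) →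
    pvGrow g bg hh w fuel (comp, fr) = (pvExpand g bg hh w)^[fuel] comp := by
  intro fuel
  induction fuel with
  | zero => intro comp fr _ _; rfl
  | succ fuel ih =>
    intro comp fr hsub hint
    by_cases hfr : fr = (∅ : Finset (Nat × Nat))
    · have hfix : pvExpand g bg hh w comp = comp := by
        ext x
        rw [mem_pvExpand]
        constructor
        · rintro (hx | ⟨q, hq, hxq⟩)
          · exact hx
          · exact hint q hq (by rw [hfr]; exact Finset.notMem_empty q) x hxq
        · exact Or.inl
      rw [pvIter_fixed_forever g bg hh w comp hfix]
      show (if fr = ∅ then comp else _) = comp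
      rw [if_pos hfr]
    · have hstep : comp ∪ ((fr.biUnion (fun q => (pvNbr g bg hh w q).toFinset)) \ comp)
          = pvExpand g bg hh w comp := by
        ext x
        rw [mem_pvExpand]
        simp only [Finset.mem_union, Finset.mem_sdiff, Finset.mem_biUnion, List.mem_toFinset]
        constructor
        · rintro (hx | ⟨⟨q, hq, hxq⟩, _⟩)
          · exact Or.inl hx
          · exact Or.inr ⟨q, hsub hq, hxq⟩
        · rintro (hx | ⟨q, hq, hxq⟩)
          · exact Or.inl hx
          · by_cases hqfr : q ∈ fr
            · by_cases hxc : x ∈ comp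
              · exact Or.inl hxc
              · exact Or.inr ⟨⟨q, hqfr, hxq⟩, hxc⟩
            · exact Or.inl (hint q hq hqfr x hxq)
      set fr' := (fr.biUnion (fun q => (pvNbr g bg hh w q).toFinset)) \ comp with hfr'
      have hsub' : fr' ⊆ comp ∪ fr' := Finset.subset_union_right
      have hint' : ∀ q ∈ comp ∪ fr', q ∉ fr' → ∀ r ∈ pvNbr g bg hh w q, r ∈ comp ∪ fr' := by
        intro q hq hqfr' r hr
        rcases Finset.mem_union.mp hq with hq | hq
        · by_cases hqfr : q ∈ fr
          · by_cases hrc : r ∈ comp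
            · exact Finset.mem_union_left _ hrc
            · refine Finset.mem_union_right _ ?_
              rw [hfr']
              exact Finset.mem_sdiff.mpr
                ⟨Finset.mem_biUnion.mpr ⟨q, hqfr, List.mem_toFinset.mpr hr⟩, hrc⟩
          · exact Finset.mem_union_left _ (hint q hq hqfr r hr)
        · exact absurd hq hqfr'
      have hrec := ih (comp ∪ fr') fr' hsub' hint'
      show (if fr = ∅ then comp else pvGrow g bg hh w fuel (comp ∪ fr', fr')) = _
      rw [if_neg hfr, hrec, hstep, ← Function.iterate_succ_apply]

theorem pvClosure_eq_iterate (g : List (List Int)) (bg : Int) (hh w : Nat) (p : Nat × Nat) :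
    pvClosure g bg hh w p = (pvExpand g bg hh w)^[hh * w] {p} := by
  unfold pvClosure
  refine pvGrow_eq g bg hh w (hh * w) {p} {p} (Finset.Subset.refl _) ?_
  intro q hq hqn
  exact absurd hq hqn

theorem pvClosure_fixed {g bg hh w} {p : Nat × Nat} (hp : pvValid g bg hh w p) :
    pvExpand g bg hh w (pvClosure g bg hh w p) = pvClosure g bg hh w p := by
  have hcard : ∀ n, ((pvExpand g bg hh w)^[n] {p}).card ≤ hh * w := by
    intro n
    have hsub : (pvExpand g bg hh w)^[n] {p} ⊆ Finset.range hh ×ˢ Finset.range w := by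
      intro q hq
      have hv := pvConn_valid_right (pvClosure_sound hp n q hq)
      simp only [Finset.mem_product, Finset.mem_range]
      exact ⟨hv.1, hv.2.1⟩
    calc ((pvExpand g bg hh w)^[n] {p}).card ≤ (Finset.range hh ×ˢ Finset.range w).card :=
          Finset.card_le_card hsub
      _ = hh * w := by rw [Finset.card_product, Finset.card_range, Finset.card_range]
  have key : ∀ n : Nat, (∃ m ≤ n, pvExpand g bg hh w ((pvExpand g bg hh w)^[m] {p}) =
      (pvExpand g bg hh w)^[m] {p}) ∨ n + 1 ≤ ((pvExpand g bg hh w)^[n] {p}).card := by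
    intro n
    induction n with
    | zero =>
      right
      simp
    | succ n ih =>
      rcases ih with ⟨m, hm, hfix⟩ | hc
      · exact Or.inl ⟨m, hm.trans (Nat.le_succ n), hfix⟩
      · by_cases hfix : pvExpand g bg hh w ((pvExpand g bg hh w)^[n] {p}) =
            (pvExpand g bg hh w)^[n] {p}
        · exact Or.inl ⟨n, Nat.le_succ n, hfix⟩
        · right
          have hss : (pvExpand g bg hh w)^[n] {p} ⊂ (pvExpand g bg hh w)^[n + 1] {p} := by
            rw [Function.iterate_succ_apply']
            exact Finset.ssubset_iff_subset_ne.mpr ⟨Finset.subset_union_left, fun he => hfix he.symm⟩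
          have := Finset.card_lt_card hss
          omega
  rcases key (hh * w) with ⟨m, hm, hfix⟩ | hc
  · have hstable := pvIter_fixed_forever g bg hh w _ hfix (hh * w - m)
    have heq : (pvExpand g bg hh w)^[hh * w] {p} = (pvExpand g bg hh w)^[m] {p} := by
      conv_lhs => rw [show hh * w = hh * w - m + m by omega]
      rw [Function.iterate_add_apply]
      exact hstable
    rw [pvClosure_eq_iterate, heq]
    exact hfix
  · have := hcard (hh * w)
    omega

theorem mem_pvClosure_iff {g bg hh w} {p : Nat × Nat} (hp : pvValid g bg hh w p) {q : Nat × Nat} :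
    q ∈ pvClosure g bg hh w p ↔ pvConn g bg hh w p q := by
  rw [pvClosure_eq_iterate]
  constructor
  · exact pvClosure_sound hp (hh * w) q
  · intro hc
    induction hc with
    | refl hv =>
      exact pvIter_subset g bg hh w p (Nat.zero_le _) (by simp)
    | tail hc ha hv ih =>
      rw [← pvClosure_eq_iterate] at ih ⊢
      have hmem : _ ∈ pvExpand g bg hh w (pvClosure g bg hh w p) :=
        mem_pvExpand.mpr (Or.inr ⟨_, ih, mem_pvNbr.mpr ⟨hv, ha⟩⟩)
      rwa [pvClosure_fixed hp] at hmem

theorem pvClosure_card_le {g bg hh w} {p : Nat × Nat} (hp : pvValid g bg hh w p) :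
    (pvClosure g bg hh w p).card ≤ hh * w := by
  have hsub : pvClosure g bg hh w p ⊆ Finset.range hh ×ˢ Finset.range w := by
    intro q hq
    have hv := pvConn_valid_right ((mem_pvClosure_iff hp).mp hq)
    simp only [Finset.mem_product, Finset.mem_range]
    exact ⟨hv.1, hv.2.1⟩
  calc (pvClosure g bg hh w p).card ≤ (Finset.range hh ×ˢ Finset.range w).card :=
        Finset.card_le_card hsub
    _ = hh * w := by rw [Finset.card_product, Finset.card_range, Finset.card_range]

theorem pvCellsOf_append_tuple (obj : List (Nat × Nat × Int)) (p : Nat × Nat) (v : Int) :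
    pvCellsOf (obj ++ [(p.1, p.2, v)]) = pvCellsOf obj ++ [p] := by
  simp [pvCellsOf]

-- the DFS collects exactly the component cells not already visited
theorem pvDfs_spec (g : List (List Int)) (bg : Int) (hh w : Nat)
    (C : Finset (Nat × Nat)) (s : Nat × Nat)
    (hCs : ∀ q ∈ C, pvConn g bg hh w s q)
    (hsC : ∀ q, pvConn g bg hh w s q → q ∈ C)
    (V : Finset (Nat × Nat)) (hVC : ∀ q ∈ C, q ∉ V) :
    ∀ (fuel : Nat) (stk : List (Nat × Nat)) (vis : Finset (Nat × Nat))
      (obj : List (Nat × Nat × Int)),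
    (∀ q ∈ stk, q ∈ C) → stk.Nodup →
    (∀ t ∈ obj, (t.1, t.2.1) ∈ C ∧ t.2.2 = pvAt g t.1 t.2.1) →
    (pvCellsOf obj).Nodup →
    (∀ q ∈ stk, q ∉ pvCellsOf obj) →
    vis = V ∪ (pvCellsOf obj).toFinset ∪ stk.toFinset →
    (∀ t ∈ obj, ∀ r, pvAdj (t.1, t.2.1) r → pvValid g bg hh w r → r ∈ vis) →
    s ∈ (pvCellsOf obj).toFinset ∪ stk.toFinset →
    stk.length + 2 * (C \ vis).card ≤ fuel →
    (pvCellsOf (pvDfs g bg hh w fuel stk vis obj).1).toFinset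
        = (pvCellsOf obj).toFinset ∪ stk.toFinset ∪ (C \ vis) ∧
    (pvCellsOf (pvDfs g bg hh w fuel stk vis obj).1).Nodup ∧
    (∀ t ∈ (pvDfs g bg hh w fuel stk vis obj).1, (t.1, t.2.1) ∈ C ∧ t.2.2 = pvAt g t.1 t.2.1) ∧
    (pvDfs g bg hh w fuel stk vis obj).2 = vis ∪ (C \ vis) := by
  intro fuel
  induction fuel with
  | zero =>
    intro stk vis obj hstkC hstknd hobjC hobjnd hdisj hvis hclosed hs hfuel
    have hstk : stk = [] := by
      cases stk with
      | nil => rfl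
      | cons a l => simp at hfuel
    subst hstk
    have hempty : C \ vis = ∅ := Finset.card_eq_zero.mp (by omega)
    simp only [pvDfs, hempty]
    refine ⟨by simp, hobjnd, hobjC, by simp⟩
  | succ fuel ih =>
    intro stk vis obj hstkC hstknd hobjC hobjnd hdisj hvis hclosed hs hfuel
    cases stk with
    | nil =>
      -- stack empty: everything connected to s is already collected
      have hconn : ∀ q, pvConn g bg hh w s q → q ∈ (pvCellsOf obj).toFinset := by
        intro q hc
        induction hc with
        | refl hv =>
          simpa using hs
        | tail hc' ha hv ihq =>
          rename_i x y
          obtain ⟨t, ht, hcell⟩ := List.mem_map.mp (List.mem_toFinset.mp ihq)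
          have hyvis : y ∈ vis := by
            apply hclosed t ht
            · rw [hcell]; exact ha
            · exact hv
          have hyC : y ∈ C := hsC y (pvConn.tail hc' ha hv)
          rw [hvis] at hyvis
          simp only [Finset.mem_union, List.toFinset_nil, Finset.notMem_empty, or_false] at hyvis
          rcases hyvis with hyV | hy
          · exact absurd hyV (hVC y hyC)
          · exact hy
      have hempty : C \ vis = ∅ := by
        rw [Finset.sdiff_eq_empty_iff_subset]
        intro q hq
        have := hconn q (hCs q hq)
        rw [hvis]
        simp only [Finset.mem_union]
        tauto
      simp only [pvDfs, hempty]
      refine ⟨by simp, hobjnd, hobjC, by simp⟩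
    | cons p stk =>
      obtain ⟨new, heq, hnewnd, hnewvis, hsub, hcom⟩ := pvPush_spec g bg hh w p pvDirs stk vis
      rw [← pvNbr_eq_aux] at hsub hcom
      have hpC : p ∈ C := hstkC p List.mem_cons_self
      have hpconn : pvConn g bg hh w s p := hCs p hpC
      have hnewC : ∀ q ∈ new, q ∈ C := by
        intro q hq
        obtain ⟨hv, ha⟩ := mem_pvNbr.mp (hsub q hq)
        exact hsC q (pvConn.tail hpconn ha hv)
      have hpvis : p ∈ vis := by
        rw [hvis]; simp
      have hstkvis : ∀ q ∈ stk, q ∈ vis := by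
        intro q hq
        rw [hvis]
        simp only [Finset.mem_union, List.mem_toFinset, List.toFinset_cons, Finset.mem_insert]
        tauto
      have hnewsub : new.toFinset ⊆ C \ vis := by
        intro q hq
        rw [List.mem_toFinset] at hq
        exact Finset.mem_sdiff.mpr ⟨hnewC q hq, hnewvis q hq⟩
      have hnewlen : new.toFinset.card = new.length := List.toFinset_card_of_nodup hnewnd
      have hnewle : new.length ≤ (C \ vis).card := by
        rw [← hnewlen]
        exact Finset.card_le_card hnewsub
      have hsdiff : C \ (vis ∪ new.toFinset) = (C \ vis) \ new.toFinset := by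
        ext x; simp only [Finset.mem_sdiff, Finset.mem_union]; tauto
      have hcard : (C \ (vis ∪ new.toFinset)).card = (C \ vis).card - new.length := by
        rw [hsdiff, Finset.card_sdiff, Finset.inter_eq_left.mpr hnewsub, hnewlen]
      have hnewCvis : ∀ x ∈ new, x ∈ C ∧ x ∉ vis := by
        intro x hx
        have := hnewsub (List.mem_toFinset.mpr hx)
        exact Finset.mem_sdiff.mp this
      have hstktl : stk.Nodup := hstknd.of_cons
      have hpstk : p ∉ stk := by
        have := List.nodup_cons.mp hstknd
        exact this.1
      have hobjvis : ∀ q ∈ pvCellsOf obj, q ∈ vis := by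
        intro q hq
        rw [hvis]
        simp only [Finset.mem_union, List.mem_toFinset]
        tauto
      set obj' := obj ++ [(p.1, p.2, pvAt g p.1 p.2)] with hobj'
      have hcells' : pvCellsOf obj' = pvCellsOf obj ++ [p] := pvCellsOf_append_tuple obj p _
      have hfuel' : (new ++ stk).length + 2 * (C \ (vis ∪ new.toFinset)).card ≤ fuel := by
        simp only [List.length_append]
        simp only [List.length_cons] at hfuel
        omega
      have H1 : ∀ q ∈ new ++ stk, q ∈ C := by
        intro q hq
        rcases List.mem_append.mp hq with hq | hq
        · exact hnewC q hq
        · exact hstkC q (List.mem_cons_of_mem p hq)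
      have H2 : (new ++ stk).Nodup := by
        rw [List.nodup_append]
        refine ⟨hnewnd, hstktl, ?_⟩
        intro a ha b hb hab
        subst hab
        exact hnewvis a ha (hstkvis a hb)
      have H3 : ∀ t ∈ obj', (t.1, t.2.1) ∈ C ∧ t.2.2 = pvAt g t.1 t.2.1 := by
        intro t ht
        rcases List.mem_append.mp ht with ht | ht
        · exact hobjC t ht
        · simp only [List.mem_singleton] at ht
          subst ht
          exact ⟨by simpa using hpC, rfl⟩
      have H4 : (pvCellsOf obj').Nodup := by
        rw [hcells', List.nodup_append]
        refine ⟨hobjnd, List.nodup_singleton p, ?_⟩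
        intro a ha b hb hab
        subst hab
        simp only [List.mem_singleton] at hb
        subst hb
        exact hdisj a List.mem_cons_self ha
      have H5 : ∀ q ∈ new ++ stk, q ∉ pvCellsOf obj' := by
        intro q hq
        rw [hcells']
        intro hmem
        rcases List.mem_append.mp hmem with hm | hm
        · rcases List.mem_append.mp hq with hq' | hq'
          · exact hnewvis q hq' (hobjvis q hm)
          · exact hdisj q (List.mem_cons_of_mem p hq') hm
        · simp only [List.mem_singleton] at hm
          subst hm
          rcases List.mem_append.mp hq with hq' | hq'
          · exact hnewvis q hq' hpvis
          · exact hpstk hq'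
      have H6 : vis ∪ new.toFinset = V ∪ (pvCellsOf obj').toFinset ∪ (new ++ stk).toFinset := by
        rw [hcells', hvis]
        ext x
        simp only [Finset.mem_union, List.toFinset_append, List.toFinset_cons, List.toFinset_nil,
          insert_empty_eq, Finset.mem_insert, Finset.mem_singleton, List.mem_toFinset]
        constructor
        · intro hx; tauto
        · intro hx; tauto
      have H7 : ∀ t ∈ obj', ∀ r, pvAdj (t.1, t.2.1) r → pvValid g bg hh w r →
          r ∈ vis ∪ new.toFinset := by
        intro t ht r ha hv
        rcases List.mem_append.mp ht with ht | ht
        · exact Finset.mem_union_left _ (hclosed t ht r ha hv)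
        · simp only [List.mem_singleton] at ht
          subst ht
          simp only at ha
          by_cases hrv : r ∈ vis
          · exact Finset.mem_union_left _ hrv
          · refine Finset.mem_union_right _ (List.mem_toFinset.mpr ?_)
            exact hcom r (mem_pvNbr.mpr ⟨hv, by simpa using ha⟩) hrv
      have H8 : s ∈ (pvCellsOf obj').toFinset ∪ (new ++ stk).toFinset := by
        rw [hcells']
        simp only [Finset.mem_union, List.toFinset_append, List.toFinset_cons, List.toFinset_nil,
          insert_empty_eq, Finset.mem_insert, Finset.mem_singleton, List.mem_toFinset] at hs ⊢
        tauto
      obtain ⟨ha1, ha2, ha3, ha4⟩ :=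
        ih (new ++ stk) (vis ∪ new.toFinset) obj' H1 H2 H3 H4 H5 H6 H7 H8 hfuel'
      have hstep : pvDfs g bg hh w (fuel + 1) (p :: stk) vis obj
          = pvDfs g bg hh w fuel (new ++ stk) (vis ∪ new.toFinset) obj' := by
        rw [show pvDfs g bg hh w (fuel + 1) (p :: stk) vis obj
            = pvDfs g bg hh w fuel (pvPush g bg hh w p pvDirs stk vis).1
                (pvPush g bg hh w p pvDirs stk vis).2 obj' from rfl, heq]
      rw [hstep]
      refine ⟨?_, ha2, ha3, ?_⟩
      · rw [ha1, hcells']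
        ext x
        simp only [Finset.mem_union, Finset.mem_sdiff, List.toFinset_append, List.toFinset_cons,
          List.toFinset_nil, insert_empty_eq, Finset.mem_insert, Finset.mem_singleton,
          List.mem_toFinset]
        have hxf := hnewCvis x
        constructor
        · intro hx; tauto
        · intro hx; tauto
      · rw [ha4]
        ext x
        simp only [Finset.mem_union, Finset.mem_sdiff, List.mem_toFinset]
        have hxf := hnewCvis x
        constructor
        · intro hx; tauto
        · intro hx; tauto
-- the two background computations build the same Counter
theorem pvBg_eq (g : List (List Int)) : pvBgA g = pvBgB g := by
  unfold pvBgA pvBgB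
  rw [PySem.Dict.counter_eq_foldl]
  have hfold : ∀ (l : List (List Int)) (d : PySem.Dict Int Int),
      l.foldl (fun d row => row.foldl (fun d x => d.modify x 0 (· + 1)) d) d
        = (l.flatMap (fun row => row)).foldl (fun d x => d.modify x 0 (· + 1)) d := by
    intro l
    induction l with
    | nil => intro d; simp
    | cons r t ihl => intro d; simp [List.foldl_append, ihl]
  rw [hfold]

theorem pvListMin_eq_finset (l : List Nat) (hl : l ≠ []) :
    (PySem.List.min? l (fun x => x)).getD 0 = l.toFinset.min.untopD 0 := by
  obtain ⟨m, hm⟩ : ∃ m, PySem.List.min? l (fun x => x) = some m := by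
    cases he : PySem.List.min? l (fun x => x) with
    | none =>
      rw [PySem.List.min?_eq_none_iff] at he
      exact absurd he hl
    | some m => exact ⟨m, rfl⟩
  have hmem := PySem.List.min?_mem hm
  have hmin := PySem.List.min?_isMin hm
  have hne : l.toFinset.Nonempty := ⟨m, List.mem_toFinset.mpr hmem⟩
  rw [hm, ← Finset.coe_min' hne]
  simp only [Option.getD_some, WithTop.untopD_coe]
  refine le_antisymm ?_ ?_
  · exact Finset.le_min' _ _ _ (fun y hy => hmin y (List.mem_toFinset.mp hy))
  · exact Finset.min'_le _ _ (List.mem_toFinset.mpr hmem)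

theorem pvListMax_eq_finset (l : List Nat) (hl : l ≠ []) :
    (PySem.List.max? l (fun x => x)).getD 0 = l.toFinset.max.unbotD 0 := by
  obtain ⟨m, hm⟩ : ∃ m, PySem.List.max? l (fun x => x) = some m := by
    cases he : PySem.List.max? l (fun x => x) with
    | none =>
      rw [PySem.List.max?_eq_none_iff] at he
      exact absurd he hl
    | some m => exact ⟨m, rfl⟩
  have hmem := PySem.List.max?_mem hm
  have hmax := PySem.List.max?_isMax hm
  have hne : l.toFinset.Nonempty := ⟨m, List.mem_toFinset.mpr hmem⟩
  rw [hm, ← Finset.coe_max' hne]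
  simp only [Option.getD_some, WithBot.unbotD_coe]
  refine le_antisymm ?_ ?_
  · exact Finset.le_max' _ _ (List.mem_toFinset.mpr hmem)
  · exact Finset.max'_le _ hne _ (fun y hy => hmax y (List.mem_toFinset.mp hy))

theorem pvToFinset_map (l : List (Nat × Nat)) :
    (l.map Prod.snd).toFinset = l.toFinset.image Prod.snd := by
  ext x
  simp [List.mem_map, Finset.mem_image]

-- writes at distinct targets commute
theorem pvSetG_comm (res : List (List Int)) (r1 c1 : Nat) (v1 : Int) (r2 c2 : Nat) (v2 : Int)
    (hne : (r1, c1) ≠ (r2, c2)) :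
    pvSetG (pvSetG res r1 c1 v1) r2 c2 v2 = pvSetG (pvSetG res r2 c2 v2) r1 c1 v1 := by
  by_cases hr : r1 = r2
  · subst hr
    have hc : c1 ≠ c2 := by
      intro hc; exact hne (by rw [hc])
    by_cases hlen : r1 < res.length
    · have hrow1 : (res.set r1 ((res.getD r1 []).set c1 v1)).getD r1 []
          = (res.getD r1 []).set c1 v1 := by
        simp only [List.getD]
        rw [List.getElem?_set_self (by simpa using hlen)]
        rfl
      have hrow2 : (res.set r1 ((res.getD r1 []).set c2 v2)).getD r1 []
          = (res.getD r1 []).set c2 v2 := by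
        simp only [List.getD]
        rw [List.getElem?_set_self (by simpa using hlen)]
        rfl
      unfold pvSetG
      rw [hrow1, hrow2, List.set_set, List.set_set, List.set_comm _ _ hc]
    · have hnoop : ∀ row : List Int, res.set r1 row = res := by
        intro row
        exact List.set_eq_of_length_le (by omega)
      unfold pvSetG
      simp [hnoop]
  · unfold pvSetG
    have h1 : (res.set r1 ((res.getD r1 []).set c1 v1)).getD r2 [] = res.getD r2 [] := by
      simp only [List.getD]
      rw [List.getElem?_set_ne hr]
    have h2 : (res.set r2 ((res.getD r2 []).set c2 v2)).getD r1 [] = res.getD r1 [] := by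
      simp only [List.getD]
      rw [List.getElem?_set_ne (fun h => hr h.symm)]
    rw [h1, h2, List.set_comm _ _ hr]
theorem pvCellsList_nodup (hh w : Nat) : (pvCellsList hh w).Nodup :=
  List.Nodup.product List.nodup_range List.nodup_range

theorem mem_pvCellsList {hh w : Nat} {q : Nat × Nat} :
    q ∈ pvCellsList hh w ↔ q.1 < hh ∧ q.2 < w := by
  obtain ⟨a, b⟩ := q
  unfold pvCellsList
  rw [List.mem_product]
  simp [List.mem_range]

-- the two per-object write batches agree
theorem pvBatch_eq (g : List (List Int)) (hh w : Nat)
    (obj : List (Nat × Nat × Int)) (comp : Finset (Nat × Nat)) (res : List (List Int))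
    (hcells : (pvCellsOf obj).toFinset = comp)
    (hnd : (pvCellsOf obj).Nodup)
    (hval : ∀ t ∈ obj, t.2.2 = pvAt g t.1 t.2.1)
    (hrange : ∀ q ∈ comp, q.1 < hh ∧ q.2 < w)
    (hne : obj ≠ []) :
    pvBatchA w res obj = pvBatchB g hh w comp res := by
  have hmapeq : obj.map (fun t => t.2.1) = (pvCellsOf obj).map Prod.snd := by
    simp [pvCellsOf, List.map_map]
  have hcsne : obj.map (fun t => t.2.1) ≠ [] := by
    simpa using hne
  have himg : comp.image Prod.snd = (obj.map (fun t => t.2.1)).toFinset := by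
    rw [← hcells, hmapeq, pvToFinset_map]
  have hmin : (PySem.List.min? (obj.map (fun t => t.2.1)) (fun x => x)).getD 0
      = (comp.image Prod.snd).min.untopD 0 := by
    rw [pvListMin_eq_finset _ hcsne, himg]
  have hmax : (PySem.List.max? (obj.map (fun t => t.2.1)) (fun x => x)).getD 0
      = (comp.image Prod.snd).max.unbotD 0 := by
    rw [pvListMax_eq_finset _ hcsne, himg]
  set owA := (PySem.List.max? (obj.map (fun t => t.2.1)) (fun x => x)).getD 0
      - (PySem.List.min? (obj.map (fun t => t.2.1)) (fun x => x)).getD 0 + 1 with howA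
  have howeq : owA = (comp.image Prod.snd).max.unbotD 0 - (comp.image Prod.snd).min.untopD 0 + 1 := by
    rw [howA, hmin, hmax]
  have hAdef : pvBatchA w res obj = obj.foldl (fun res t =>
      if t.2.1 + owA + 1 < w then pvSetG res t.1 (t.2.1 + owA + 1) t.2.2 else res) res := rfl
  have hBdef : pvBatchB g hh w comp res = (pvCellsList hh w).foldl (fun res q =>
      if q ∈ comp ∧ q.2 + owA + 1 < w then pvSetG res q.1 (q.2 + owA + 1) (pvAt g q.1 q.2)
      else res) res := by
    rw [howeq]
    rfl
  have hA : obj.foldl (fun res t =>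
        if t.2.1 + owA + 1 < w then pvSetG res t.1 (t.2.1 + owA + 1) t.2.2 else res) res
      = (pvCellsOf obj).foldl (fun res q =>
        if q.2 + owA + 1 < w then pvSetG res q.1 (q.2 + owA + 1) (pvAt g q.1 q.2) else res) res := by
    unfold pvCellsOf
    rw [List.foldl_map]
    refine PySem.List.foldl_congr_mem obj _ _ res ?_
    intro acc t ht
    simp only
    rw [hval t ht]
  have hsplit : (fun (res : List (List Int)) (q : Nat × Nat) =>
        if q ∈ comp ∧ q.2 + owA + 1 < w then pvSetG res q.1 (q.2 + owA + 1) (pvAt g q.1 q.2)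
        else res)
      = (fun res q => if (decide (q ∈ comp)) = true then
          (if q.2 + owA + 1 < w then pvSetG res q.1 (q.2 + owA + 1) (pvAt g q.1 q.2) else res)
        else res) := by
    funext r q
    by_cases h1 : q ∈ comp <;> by_cases h2 : q.2 + owA + 1 < w <;> simp [h1, h2]
  have hB : (pvCellsList hh w).foldl (fun res q =>
        if q ∈ comp ∧ q.2 + owA + 1 < w then pvSetG res q.1 (q.2 + owA + 1) (pvAt g q.1 q.2)
        else res) res
      = ((pvCellsList hh w).filter (fun q => decide (q ∈ comp))).foldl (fun res q =>
        if q.2 + owA + 1 < w then pvSetG res q.1 (q.2 + owA + 1) (pvAt g q.1 q.2) else res) res := by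
    rw [List.foldl_filter, hsplit]
  have hfilnd : ((pvCellsList hh w).filter (fun q => decide (q ∈ comp))).Nodup :=
    (pvCellsList_nodup hh w).filter _
  have hfiltf : ((pvCellsList hh w).filter (fun q => decide (q ∈ comp))).toFinset = comp := by
    ext x
    simp only [List.mem_toFinset, List.mem_filter, decide_eq_true_eq, mem_pvCellsList]
    constructor
    · intro hx; exact hx.2
    · intro hx; exact ⟨hrange x hx, hx⟩
  have hperm : (pvCellsOf obj).Perm ((pvCellsList hh w).filter (fun q => decide (q ∈ comp))) :=
    List.perm_of_nodup_nodup_toFinset_eq hnd hfilnd (hcells.trans hfiltf.symm)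
  have hcomm : ∀ x ∈ pvCellsOf obj, ∀ y ∈ pvCellsOf obj, ∀ z : List (List Int),
      (if y.2 + owA + 1 < w then
          pvSetG (if x.2 + owA + 1 < w then pvSetG z x.1 (x.2 + owA + 1) (pvAt g x.1 x.2) else z)
            y.1 (y.2 + owA + 1) (pvAt g y.1 y.2)
        else (if x.2 + owA + 1 < w then pvSetG z x.1 (x.2 + owA + 1) (pvAt g x.1 x.2) else z))
      = (if x.2 + owA + 1 < w then
          pvSetG (if y.2 + owA + 1 < w then pvSetG z y.1 (y.2 + owA + 1) (pvAt g y.1 y.2) else z)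
            x.1 (x.2 + owA + 1) (pvAt g x.1 x.2)
        else (if y.2 + owA + 1 < w then pvSetG z y.1 (y.2 + owA + 1) (pvAt g y.1 y.2) else z)) := by
    intro x hx y hy z
    by_cases hxy : x = y
    · subst hxy; rfl
    · by_cases h1 : x.2 + owA + 1 < w <;> by_cases h2 : y.2 + owA + 1 < w <;>
        simp only [h1, h2, if_false]
      · apply pvSetG_comm
        intro hcontr
        apply hxy
        have hc1 := congrArg Prod.fst hcontr
        have hc2 := congrArg Prod.snd hcontr
        simp only at hc1 hc2
        exact Prod.ext hc1 (by omega)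
  calc pvBatchA w res obj
      = obj.foldl (fun res t =>
          if t.2.1 + owA + 1 < w then pvSetG res t.1 (t.2.1 + owA + 1) t.2.2 else res) res := hAdef
    _ = (pvCellsOf obj).foldl (fun res q =>
          if q.2 + owA + 1 < w then pvSetG res q.1 (q.2 + owA + 1) (pvAt g q.1 q.2) else res) res := hA
    _ = ((pvCellsList hh w).filter (fun q => decide (q ∈ comp))).foldl (fun res q =>
          if q.2 + owA + 1 < w then pvSetG res q.1 (q.2 + owA + 1) (pvAt g q.1 q.2) else res) res :=
        hperm.foldl_eq' hcomm res
    _ = (pvCellsList hh w).foldl (fun res q =>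
          if q ∈ comp ∧ q.2 + owA + 1 < w then pvSetG res q.1 (q.2 + owA + 1) (pvAt g q.1 q.2)
          else res) res := hB.symm
    _ = pvBatchB g hh w comp res := hBdef.symm

-- the two row-major scans stay in lockstep: same visited set, and A's pending
-- object batches applied to g equal B's accumulated result
theorem pvScan_agree (g : List (List Int)) (bg : Int) (hh w : Nat) :
    ∀ (cells : List (Nat × Nat)) (vis : Finset (Nat × Nat))
      (objs : List (List (Nat × Nat × Int))) (res : List (List Int)),
    (∀ p ∈ cells, p.1 < hh ∧ p.2 < w) →
    (∀ q ∈ vis, pvValid g bg hh w q ∧ ∀ r, pvConn g bg hh w q r → r ∈ vis) →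
    res = objs.foldl (pvBatchA w) g →
    ((cells.foldl
        (fun (st : Finset (Nat × Nat) × List (List (Nat × Nat × Int))) p =>
          if p ∉ st.1 ∧ pvAt g p.1 p.2 ≠ bg then
            let r := pvDfs g bg hh w (3 * (hh * w) + 3) [p] (insert p st.1) []
            (r.2, st.2 ++ [r.1])
          else st) (vis, objs)).2).foldl (pvBatchA w) g
      = (cells.foldl
        (fun (st : Finset (Nat × Nat) × List (List Int)) p =>
          if p ∉ st.1 ∧ pvAt g p.1 p.2 ≠ bg then
            let comp := pvClosure g bg hh w p
            (st.1 ∪ comp, pvBatchB g hh w comp st.2)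
          else st) (vis, res)).2 := by
  intro cells
  induction cells with
  | nil =>
    intro vis objs res hcells hsat hres
    simpa using hres.symm
  | cons p cells ih =>
    intro vis objs res hcells hsat hres
    simp only [List.foldl_cons]
    by_cases hguard : p ∉ vis ∧ pvAt g p.1 p.2 ≠ bg
    · rw [if_pos hguard, if_pos hguard]
      have hp : pvValid g bg hh w p :=
        ⟨(hcells p List.mem_cons_self).1, (hcells p List.mem_cons_self).2, hguard.2⟩
      set C := pvClosure g bg hh w p with hC
      have hCs : ∀ q ∈ C, pvConn g bg hh w p q := fun q hq => (mem_pvClosure_iff hp).mp hq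
      have hsC : ∀ q, pvConn g bg hh w p q → q ∈ C := fun q hq => (mem_pvClosure_iff hp).mpr hq
      have hVC : ∀ q ∈ C, q ∉ vis := by
        intro q hq hqvis
        exact hguard.1 ((hsat q hqvis).2 p (pvConn_symm (hCs q hq)))
      have hpC : p ∈ C := hsC p (pvConn.refl p hp)
      obtain ⟨hd1, hd2, hd3, hd4⟩ := pvDfs_spec g bg hh w C p hCs hsC vis hVC
        (3 * (hh * w) + 3) [p] (insert p vis) []
        (by intro q hq; simp only [List.mem_singleton] at hq; subst hq; exact hpC)
        (List.nodup_singleton p)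
        (by intro t ht; simp at ht)
        (by simp [pvCellsOf])
        (by intro q hq; simp [pvCellsOf])
        (by ext x; simp [pvCellsOf])
        (by intro t ht; simp at ht)
        (by simp [pvCellsOf])
        (by
          have hcard : (C \ insert p vis).card ≤ C.card := Finset.card_le_card (Finset.sdiff_subset)
          have hle := pvClosure_card_le hp
          rw [← hC] at hle
          simp only [List.length_singleton]
          omega)
      set dres := pvDfs g bg hh w (3 * (hh * w) + 3) [p] (insert p vis) [] with hdres
      have hcellsC : (pvCellsOf dres.1).toFinset = C := by
        rw [hd1]
        have h1 : (pvCellsOf ([] : List (Nat × Nat × Int))).toFinset = (∅ : Finset (Nat × Nat)) := by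
          simp [pvCellsOf]
        have h2 : ([p] : List (Nat × Nat)).toFinset = {p} := by simp
        rw [h1, h2]
        ext x
        constructor
        · intro hx
          rcases Finset.mem_union.mp hx with hx | hx
          · rcases Finset.mem_union.mp hx with hx | hx
            · exact absurd hx (Finset.notMem_empty x)
            · rw [Finset.mem_singleton.mp hx]; exact hpC
          · exact (Finset.mem_sdiff.mp hx).1
        · intro hx
          by_cases hxp : x = p
          · exact Finset.mem_union_left _ (Finset.mem_union_right _ (Finset.mem_singleton.mpr hxp))
          · refine Finset.mem_union_right _ (Finset.mem_sdiff.mpr ⟨hx, ?_⟩)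
            intro hmem
            rcases Finset.mem_insert.mp hmem with h | h
            · exact hxp h
            · exact hVC x hx h
      have hvis' : dres.2 = vis ∪ C := by
        rw [hd4]
        ext x
        constructor
        · intro hx
          rcases Finset.mem_union.mp hx with hx | hx
          · rcases Finset.mem_insert.mp hx with hx | hx
            · rw [hx]; exact Finset.mem_union_right _ hpC
            · exact Finset.mem_union_left _ hx
          · exact Finset.mem_union_right _ (Finset.mem_sdiff.mp hx).1
        · intro hx
          rcases Finset.mem_union.mp hx with hx | hx
          · exact Finset.mem_union_left _ (Finset.mem_insert_of_mem hx)
          · by_cases hxi : x ∈ insert p vis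
            · exact Finset.mem_union_left _ hxi
            · exact Finset.mem_union_right _ (Finset.mem_sdiff.mpr ⟨hx, hxi⟩)
      have hobne : dres.1 ≠ [] := by
        intro hnil
        have : (pvCellsOf dres.1).toFinset = ∅ := by rw [hnil]; simp [pvCellsOf]
        rw [hcellsC] at this
        rw [this] at hpC
        exact Finset.notMem_empty p hpC
      have hbatch : pvBatchA w res dres.1 = pvBatchB g hh w C res := by
        refine pvBatch_eq g hh w dres.1 C res hcellsC hd2 (fun t ht => (hd3 t ht).2) ?_ hobne
        intro q hq
        have hv := pvConn_valid_right (hCs q hq)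
        exact ⟨hv.1, hv.2.1⟩
      have hres' : (objs ++ [dres.1]).foldl (pvBatchA w) g = pvBatchB g hh w C res := by
        rw [List.foldl_append]
        simp only [List.foldl_cons, List.foldl_nil]
        rw [← hres, hbatch]
      have hsat' : ∀ q ∈ vis ∪ C, pvValid g bg hh w q ∧
          ∀ r, pvConn g bg hh w q r → r ∈ vis ∪ C := by
        intro q hq
        rcases Finset.mem_union.mp hq with hq | hq
        · exact ⟨(hsat q hq).1, fun r hr => Finset.mem_union_left _ ((hsat q hq).2 r hr)⟩
        · refine ⟨pvConn_valid_right (hCs q hq), ?_⟩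
          intro r hr
          exact Finset.mem_union_right _ (hsC r (pvConn_trans (hCs q hq) hr))
      have hstep := ih (vis ∪ C) (objs ++ [dres.1]) (pvBatchB g hh w C res)
        (fun q hq => hcells q (List.mem_cons_of_mem p hq)) hsat' hres'.symm
      nth_rewrite 1 [← hvis'] at hstep
      exact hstep
    · rw [if_neg hguard, if_neg hguard]
      exact ih vis objs res (fun q hq => hcells q (List.mem_cons_of_mem p hq)) hsat hres

theorem pvFinal_eq (g : List (List Int)) : duplicate_objs_h g = duplicate_objs_h_alt g := by
  unfold duplicate_objs_h duplicate_objs_h_alt pvScanA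
  rw [pvBg_eq g]
  exact pvScan_agree g (pvBgB g) g.length ((g.headD []).length) (pvCellsList g.length ((g.headD []).length))
    ∅ [] g (fun p hp => mem_pvCellsList.mp hp) (by simp) rfl

-- ===== VERDICT (by name: the statement is the Claim_ definition above) =====
theorem duplicate_objs_h_spec : Claim_equal_duplicate_objs_h := by
  intro g _ _
  unfold Spec_duplicate_objs_h
  exact pvFinal_eq g
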